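-- pv_equiv track=rewrite | github.com/hhhhjjj/leetcode | 数组拿掉数字.py | solution
-- ===== SOURCE A (Python) =====
-- def solution(ls_old, ls):
--     my_dict = {}
--     for num in ls:
--         if my_dict.get(num) is None:
--             my_dict[num] = 1
--         else:
--             my_dict[num] += 1
--     res = []
--     for num in ls_old:
--         if my_dict.get(num) is None \
--                 or my_dict[num] == 0:
--             res.append(num)
--         else:
--             my_dict[num] -= 1
--     return res
--
-- ls_old = [1,2,3,4]
--
-- ls = [1,2]
-- ===== SOURCE B (Python) =====
-- def solution(ls_old, ls):
--     # Keep the i-th element iff its occurrence number within ls_old[:i+1]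
--     # exceeds its multiplicity in ls (the first count(ls) occurrences cancel).
--     return [v for i, v in enumerate(ls_old) if ls_old[:i + 1].count(v) > ls.count(v)]
-- ===== Notes on version B (the rewrite author's own statement) =====
-- stated objective: simpler
-- what changed: Replaces A's mutable count-dict with decrement bookkeeping by a stateless one-line comprehension that keeps the i-th element iff its occurrence count within ls_old[:i+1] exceeds its multiplicity in ls.
import Mathlib
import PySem

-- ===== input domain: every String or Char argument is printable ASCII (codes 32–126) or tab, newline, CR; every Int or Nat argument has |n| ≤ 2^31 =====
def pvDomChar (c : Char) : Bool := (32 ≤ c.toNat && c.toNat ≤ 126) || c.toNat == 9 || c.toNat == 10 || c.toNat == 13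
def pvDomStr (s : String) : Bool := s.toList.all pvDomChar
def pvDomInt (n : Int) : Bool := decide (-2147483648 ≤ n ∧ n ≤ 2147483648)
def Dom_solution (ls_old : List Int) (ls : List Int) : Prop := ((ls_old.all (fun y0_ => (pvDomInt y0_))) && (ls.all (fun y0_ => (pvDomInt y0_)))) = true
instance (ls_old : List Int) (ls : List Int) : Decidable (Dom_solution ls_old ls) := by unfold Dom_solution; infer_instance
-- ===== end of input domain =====

-- B replaces A's mutable count-dict cancellation loop with a stateless
-- comprehension: keep the i-th element iff its occurrence number within
-- ls_old[:i+1] exceeds its multiplicity in ls (simpler, no mutable state).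

-- ===== PORT A =====
-- first loop: build the count dict (if absent insert 1, else read and write value+1)
def solutionBuild (ls : List Int) : PySem.Dict Int Int :=
  ls.foldl (fun d num =>
    match d.get? num with
    | none => d.insert num 1
    | some v => d.insert num (v + 1)) PySem.Dict.empty

-- second loop: state = (dict, res)
def solutionStep (st : PySem.Dict Int Int × List Int) (num : Int) :
    PySem.Dict Int Int × List Int :=
  if st.1.get? num = none ∨ st.1.getD num 0 = 0 then
    (st.1, st.2 ++ [num])
  else
    (st.1.insert num (st.1.getD num 0 - 1), st.2)

def solution (ls_old : List Int) (ls : List Int) : List Int :=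
  (ls_old.foldl solutionStep (solutionBuild ls, [])).2

-- ===== PORT B =====
-- the comprehension: filter enumerate(ls_old) by the prefix-count test, take values
def solution_alt (ls_old : List Int) (ls : List Int) : List Int :=
  ((PySem.List.enumerate ls_old 0).filter
    (fun p => ls.count p.2 < (PySem.List.slice ls_old (some 0) (some (p.1 + 1))).count p.2)).map
    (fun p => p.2)

-- ===== PRECONDITION & SPEC =====
def Spec_solution (ls_old : List Int) (ls : List Int) (out : List Int) : Prop := out = solution_alt ls_old ls
instance (ls_old : List Int) (ls : List Int) (out : List Int) : Decidable (Spec_solution ls_old ls out) := by unfold Spec_solution; infer_instance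

-- ===== CLAIM (what is proved, stated in full; the proofs are below) =====
def Claim_equal_solution : Prop := ∀ (ls_old : List Int) (ls : List Int), Dom_solution ls_old ls → Spec_solution ls_old ls (solution ls_old ls)

-- ===== LEMMAS AND PROOFS =====

-- common specification: walk ls_old with the processed prefix p; keep x iff
-- the occurrences of x in p already used up x's multiplicity in ls
def goSpec (ls : List Int) : List Int → List Int → List Int
  | _, [] => []
  | p, x :: xs =>
      if ls.count x ≤ p.count x then x :: goSpec ls (p ++ [x]) xs
      else goSpec ls (p ++ [x]) xs

-- the built dict counts ls: getD k 0 = count of k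
theorem solutionBuild_getD (ls : List Int) (k : Int) :
    (solutionBuild ls).getD k 0 = (ls.count k : Int) := by
  have gen : ∀ (xs : List Int) (d : PySem.Dict Int Int),
      (xs.foldl (fun d num =>
        match d.get? num with
        | none => d.insert num 1
        | some v => d.insert num (v + 1)) d).getD k 0
      = d.getD k 0 + (xs.count k : Int) := by
    intro xs
    induction xs with
    | nil => intro d; simp
    | cons x xs ih =>
      intro d
      have hstep : (match d.get? x with
          | none => d.insert x 1
          | some v => d.insert x (v + 1)) = d.insert x (d.getD x 0 + 1) := by
        cases h : d.get? x with
        | none => simp [PySem.Dict.getD_of_get?_eq_none d 0 h]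
        | some v => simp [PySem.Dict.getD_of_get?_eq_some d 0 h]
      simp only [List.foldl_cons, hstep, ih, List.count_cons]
      rw [PySem.Dict.getD_insert]
      by_cases hk : k = x
      · rw [if_pos hk, hk, if_pos (by simp)]
        push_cast
        ring
      · rw [if_neg hk, if_neg (by simp [Ne.symm hk])]
        push_cast
        ring
  simpa [solutionBuild] using gen ls PySem.Dict.empty

-- A's loop equals the common specification, under the remaining-quota invariant
theorem loopA (ls : List Int) (xs : List Int) :
    ∀ (d : PySem.Dict Int Int) (res p : List Int),
      (∀ k, d.getD k 0 = (ls.count k : Int) - ((min (ls.count k) (p.count k) : Nat) : Int)) →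
      (xs.foldl solutionStep (d, res)).2 = res ++ goSpec ls p xs := by
  induction xs with
  | nil => intro d res p _; simp [goSpec]
  | cons x xs ih =>
    intro d res p hinv
    simp only [List.foldl_cons, goSpec]
    by_cases hc : ls.count x ≤ p.count x
    · have hz : d.getD x 0 = 0 := by
        rw [hinv x]
        have : min (ls.count x) (p.count x) = ls.count x := by omega
        rw [this]; ring
      rw [show solutionStep (d, res) x = (d, res ++ [x]) by simp [solutionStep, hz],
          if_pos hc]
      have hinv' : ∀ k, d.getD k 0
          = (ls.count k : Int) - ((min (ls.count k) ((p ++ [x]).count k) : Nat) : Int) := by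
        intro k
        rw [hinv k, List.count_append]
        by_cases hk : k = x
        · subst hk
          have h1 : min (ls.count k) (p.count k) = ls.count k := by omega
          have h2 : min (ls.count k) (p.count k + [k].count k) = ls.count k := by
            simp; omega
          rw [h1, h2]
        · simp [List.count_singleton]
          rw [if_neg (fun h => hk h.symm)]
          simp
      rw [ih d (res ++ [x]) (p ++ [x]) hinv']
      simp
    · have hpos : (0 : Int) < d.getD x 0 := by
        rw [hinv x]
        have : min (ls.count x) (p.count x) = p.count x := by omega
        rw [this]
        have : p.count x < ls.count x := by omega
        omega
      have hns : ¬ (d.get? x = none ∨ d.getD x 0 = 0) := by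
        rintro (h | h)
        · rw [PySem.Dict.getD_of_get?_eq_none d 0 h] at hpos; omega
        · omega
      rw [show solutionStep (d, res) x = (d.insert x (d.getD x 0 - 1), res) by
            simp only [solutionStep, if_neg hns],
          if_neg hc]
      apply ih
      intro k
      rw [PySem.Dict.getD_insert, List.count_append]
      by_cases hk : k = x
      · subst hk
        rw [if_pos rfl, hinv k]
        have h1 : min (ls.count k) (p.count k) = p.count k := by omega
        have h2 : min (ls.count k) (p.count k + [k].count k) = p.count k + 1 := by
          simp; omega
        rw [h1, h2]
        push_cast
        ring
      · rw [if_neg hk, hinv k]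
        simp [List.count_singleton]
        rw [if_neg (fun h => hk h.symm)]
        simp

-- B's filtered enumeration equals the common specification
theorem loopB (ls ls_old : List Int) (xs : List Int) :
    ∀ (n : Nat), xs = ls_old.drop n →
      ((PySem.List.enumerate xs (n : Int)).filter
        (fun p => ls.count p.2 < (PySem.List.slice ls_old (some 0) (some (p.1 + 1))).count p.2)).map
        (fun p => p.2)
      = goSpec ls (ls_old.take n) xs := by
  induction xs with
  | nil => intro n _; simp [goSpec]
  | cons x xs ih =>
    intro n hdrop
    have hget : ls_old[n]? = some x := by
      rw [← List.head?_drop, ← hdrop]; rfl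
    have hdrop' : xs = ls_old.drop (n + 1) := by
      have := congrArg List.tail hdrop
      simpa [List.tail_drop] using this
    have htake : ls_old.take (n + 1) = ls_old.take n ++ [x] := by
      rw [List.take_add_one, hget]; rfl
    have hslice : PySem.List.slice ls_old (some (0 : Int)) (some ((n : Int) + 1))
        = ls_old.take (n + 1) := by
      have h1 : ((n : Int) + 1) = (((n + 1 : Nat) : Int)) := by push_cast; ring
      rw [h1, PySem.List.slice_zero_start, PySem.List.slice_to_natCast]
    rw [PySem.List.enumerate_cons]
    simp only [List.filter_cons]
    by_cases hc : ls.count x ≤ (ls_old.take n).count x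
    · have hcond : ls.count x
          < (PySem.List.slice ls_old (some (0 : Int)) (some ((n : Int) + 1))).count x := by
        rw [hslice, htake, List.count_append, show ([x].count x) = 1 from by simp]
        omega
      rw [if_pos (by simpa using hcond)]
      simp only [List.map_cons]
      rw [goSpec, if_pos hc, ← htake]
      have := ih (n + 1) hdrop'
      rw [show ((n : Int) + 1) = ((n + 1 : Nat) : Int) by push_cast; ring]
      rw [this]
    · have hcond : ¬ ls.count x
          < (PySem.List.slice ls_old (some (0 : Int)) (some ((n : Int) + 1))).count x := by
        rw [hslice, htake, List.count_append, show ([x].count x) = 1 from by simp]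
        omega
      rw [if_neg (by simpa using hcond)]
      rw [goSpec, if_neg hc, ← htake]
      have := ih (n + 1) hdrop'
      rw [show ((n : Int) + 1) = ((n + 1 : Nat) : Int) by push_cast; ring]
      rw [this]

-- ===== VERDICT (by name: the statement is the Claim_ definition above) =====
theorem solution_spec : Claim_equal_solution := by
  intro ls_old ls _
  unfold Spec_solution solution solution_alt
  rw [loopA ls ls_old (solutionBuild ls) [] []
        (fun k => by rw [solutionBuild_getD]; simp)]
  have hb := loopB ls ls_old ls_old 0 (by simp)
  simp only [Nat.cast_zero, List.take_zero] at hb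
  rw [hb]
  simp
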